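/- GENERATED by mk_final_copies.py from the proof of the farm's unit `start_decoder.R8` (farm:start_decoder.R8.1: Proof.lean) as the
   re-elaboration sweep compiled it — do not edit. -/
import Asan.CheckWalk
import Vorbis.Spec.StartDecoderBTest
import Vorbis.Spec.Units.start_decoder_R8
import Vorbis.Spec.Worked.start_decoder_R8_Lemmas

open X86 X86.User Asan Vorbis Vorbis.Spec Vorbis.Spec.StartDecoder

set_option maxRecDepth 4000
set_option maxHeartbeats 4000000

namespace Vorbis.Spec.start_decoder_R8

/-- The signed 32-bit view of a small number is the number (`cmp [f+0x1d0], eax ; jg`: the counter `i ≤ 64`). -/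
theorem toInt_counter (i : Nat) (hi : i < 2 ^ 31) : (BitVec.ofNat 32 i).toInt = (i : Int) := by
  rw [toInt_ofNat32 i (by omega)]
  unfold sint32
  split <;> omega

/-- Two footprints in sequence: the windows of both. -/
theorem sameExcept_append {ws1 ws2 : List Span} {m1 m2 m3 : Mem} (h1 : Mem.SameExcept ws1 m1 m2)
    (h2 : Mem.SameExcept ws2 m2 m3) : Mem.SameExcept (ws1 ++ ws2) m1 m3 := by
  have a1 : Mem.SameExcept (ws1 ++ ws2) m1 m2 :=
    h1.mono (fun w hw a ha1 ha2 => ⟨w, List.mem_append_left _ hw, ha1, ha2⟩)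
  have a2 : Mem.SameExcept (ws1 ++ ws2) m2 m3 :=
    h2.mono (fun w hw a ha1 ha2 => ⟨w, List.mem_append_right _ hw, ha1, ha2⟩)
  exact a1.trans a2

/-- The value `lea r13d, [rax + 1]` leaves for a result of `get_bits(f, 6)`: no wrap. -/
theorem succ_small (z : Word) (hz : z.toNat < 64) : (BitVec.setWidth 32 (z + 1).toBitVec).toNat = z.toNat + 1 := by
  simp only [BitVec.toNat_setWidth, UInt64.toNat_toBitVec, UInt64.toNat_add]
  have : (1 : UInt64).toNat = 1 := rfl
  omega

end Vorbis.Spec.start_decoder_R8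

/-- Segment R8 of `start_decoder` (0x115f22 … 0x115f62: the head of the mapping loop 4095, then `f->mode_count = get_bits(f, 6) + 1`,
`i = 0`): from the loop invariant `AtR8` (= `MapLoop` at `pc_R8`) to `AtR9` (`i < mapping_count`, the branch at 0x115f38 taken) or
to `AtR13` (the loop is left: SD.8 = `Mid g 8 8 9` by `mid_commit`, carried over the path's stores by `mid_carry` / `frame_carry`;
MD1 from the result of `get_bits`). The walk keeps `v.reg .rsp` / `v.reg .rbp` symbolic, with their numbers `hrsp`, `hrbp`. -/
theorem Vorbis.Spec.Worked.start_decoder_R8_ok : Vorbis.Spec.start_decoder_R8.Statement := by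
  intro Lay hLay μ hμ u₀ hcode hload4 h_get_bits hstore4 g i v hat
  obtain ⟨A7, A7c, A, hb⟩ := hat
  -- 1. the entry state's facts, and where `*f` and the frame are (numbers for `u_omega`)
  have hfr := hb.frame
  have he := hfr.entry
  v_entry he
  have hwf := Vorbis.Spec.start_decoder_R8.f_where hfr hb.hand
  have hwr := Vorbis.Spec.start_decoder_R8.r_where hfr
  obtain ⟨hf1, hf2, hf3⟩ := hwf
  obtain ⟨hR1, hR2, hR3, hR4⟩ := hwr
  have hrsp : (v.reg .rsp).toNat = g.R := by
    rw [hfr.rsp]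
    exact toNat_addr _ (by omega)
  have hrbp : (v.reg .rbp).toNat = g.f := by
    rw [hb.rbp]
    exact toNat_addr _ (by omega)
  -- 2. the present state under the walker's names (0x115f22 = cut270, C line 4095)
  have w_rip := hfr.rip
  have w_eq : Mem.EqOn Vorbis.L.textLo Vorbis.L.textHi u₀.mem v.mem := hfr.code
  have hdf : v.flags .df = false := (show abiInv _ from hfr.inv).1
  have hmx : v.mxcsr &&& 0x1F80 = 0x1F80 := (show abiInv _ from hfr.inv).2
  have hsse := Vorbis.sseOK_of_abiInv hfr.inv
  have hgb := h_get_bits A.2 g.frames' (g.Blk A) g.len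
  -- 3. the two loads of the loop test, named: dword [rsp+0x10] = i, `f->mapping_count`
  have r_i : v.mem.readLE (v.reg .rsp + 16) 4 = i := by
    have := hb.cnt
    simp only [StartDecoder.slot, Mem.u32] at this
    rw [hfr.rsp, addr_add_lit]
    exact this
  obtain ⟨mc, hmc⟩ : ∃ mc : Nat, v.mem.u32 (g.f + 464) = mc := ⟨_, rfl⟩
  have r_mc : v.mem.readLE (v.reg .rbp + 464) 4 = mc := by
    rw [hb.rbp, addr_add_lit]
    exact hmc
  -- 4. the walk to the branch 0x115f38 and on to the call of `get_bits` (0x115f46)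
  u_walk hcode [hμ.vendor] until [Vorbis.L.start_decoder.cut279, Vorbis.L.start_decoder.cut272] span [Vorbis.L.textLo, Vorbis.L.textHi] side (v_side)
  case check_115f29 =>
    -- 0x115f29: the check of `f->mapping_count` (load4 f+0x1d0, C line 4095): inside `*f`
    have hun : ShadowUntouched v.mem s_115f29.mem := by v_untouched
    have hobj : LiveIn A.2 g.frames' g.f Off.sizeof.stb_vorbis := hb.hand.obj.mono (frames'_sub g A.2)
    refine hobj.accSmall hfr.shadow hun _ 4 (by decide) (by u_omega) ?_
    simp only [Vorbis.Off.sizeof.stb_vorbis]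
    u_omega
  case call_inv =>
    v_inv
  case pre_115f46 =>
    -- 0x115f46: `get_bits(f, 6)` (C line 4142)
    have hun : ShadowUntouched v.mem s_115f46.mem := by v_untouched
    have hsame : Mem.SameExcept [⟨(v.reg .rsp).toNat - 8, (v.reg .rsp).toNat⟩] v.mem s_115f46.mem := by
      u_same
    have hbits : Bits (g.Blk A) g.len s_115f46.mem g.f := by
      apply Vorbis.Spec.start_decoder_R8.bits_carry hb.mid.bits hsame
      intro w hw
      have e : w = ⟨(v.reg .rsp).toNat - 8, (v.reg .rsp).toNat⟩ := List.mem_singleton.mp hw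
      subst e
      simp only []
      omega
    have hrdi : (s_115f46.reg .rdi).toNat = g.f := by
      rw [w_rdi]
      exact hrbp
    refine ⟨⟨shadowPre_call hfr (by u_omega) hun, ?_, ?_⟩, ?_⟩
    · rw [hrdi]
      exact readerEnv_mid hb.hand hb.mid
    · rw [hrdi]
      exact hbits
    · rw [bitsArg_def, w_rsi]
      decide
  · -- 0x116105 (cut279): the branch `jg` is taken, `i < mapping_count`: the exit to R9 (C line 4095)
    have hsame : Mem.SameExcept [⟨(v.reg .rsp).toNat - 8, (v.reg .rsp).toNat⟩] v.mem s_115f38.mem := by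
      u_same
    have hinv : abiInv s_115f38 := by v_inv
    have hloop : MapLoop u₀ g pc_R9 i A7 A7c A.1 A s_115f38 := by
      refine Vorbis.Spec.start_decoder_R8.mapLoop_carry hb ⟨hf1, hf2, hf3⟩ ⟨hR1, hR2, hR3, hR4⟩ w_rip w_rsp
        (w_kept.get .rbp rfl) w_eq hinv hsame ?_
      intro w hw
      have e : w = ⟨(v.reg .rsp).toNat - 8, (v.reg .rsp).toNat⟩ := List.mem_singleton.mp hw
      subst e
      simp only []
      omega
    refine ReachVia.done (Or.inl ⟨A7, A7c, A, hloop, ?_⟩)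
    -- `i < mapping_count`, from the branch condition
    have e464 : Mem.EqOn (g.f + 464) (g.f + 468) v.mem s_115f38.mem := by
      apply hsame.eqOn
      intro w hw
      have e : w = ⟨(v.reg .rsp).toNat - 8, (v.reg .rsp).toNat⟩ := List.mem_singleton.mp hw
      subst e
      simp only []
      omega
    have ecnt : stb_vorbis.mapping_count s_115f38.mem g.f = sint32 mc := by
      simp only [vacc, voff]
      rw [e464.i32 (g.f + 464) (by omega) (by omega) (by omega), Mem.i32_def, hmc]
    have hi64 : (i : Int) ≤ 64 := by
      have h1 := hb.i_le
      have h2 := hb.maps.MP1.2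
      omega
    rw [Vorbis.Spec.start_decoder_R8.toInt_counter i (by omega), toInt_ofNat32 mc (by rw [← hmc]; exact Mem.u32_lt _ _)]
      at hbr_115f38
    rw [ecnt]
    exact hbr_115f38
  · -- 0x115f4b: `get_bits` has returned
    v_after_call w_rsp_115f46 w_mem_115f46
    simp only [w_rdi_115f46] at w_same
    have hz24 : v.mem.readLE (v.reg .rsp + 36) 4 = 0 := by
      have := hb.mid.consts.z24 (by omega) (by omega)
      simp only [Mem.u32] at this
      rw [hfr.rsp, addr_add_lit]
      exact this
    have hp24 : s_115f46.mem.readLE (v.reg .rsp + 36) 4 = 0 := by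
      rw [w_mem_115f46]
      u_read
    have e36 : (v.reg .rsp + 36).toNat = g.R + 36 := by u_omega
    have e8 : (v.reg .rsp - 8).toNat = g.R - 8 := by u_omega
    have hs24 : s_115f46r.mem.readLE (v.reg .rsp + 36) 4 = 0 := by
      rw [w_same.readLE _ 4 (by omega) ?_, ← w_mem_115f46]
      · exact hp24
      · intro w hw
        simp only [List.mem_cons, List.mem_nil_iff, or_false] at hw
        rcases hw with rfl | rfl | rfl | rfl | rfl | rfl
        all_goals
          simp only []
          omega
    have hunr : ShadowUntouched v.mem s_115f46r.mem := by v_untouched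
    obtain ⟨z, w_rax⟩ : ∃ z, s_115f46r.reg .rax = z := ⟨_, rfl⟩
    -- the callee's post: `Bits f` again, the result below 2^6
    have hpost : GetBitsSpecPost (g.Blk A) g.len (s_115f46.reg .rdi).toNat (bitsArg s_115f46) s_115f46 s_115f46r := w_post
    have hrdi : (s_115f46.reg .rdi).toNat = g.f := by
      rw [w_rdi_115f46]
      exact hrbp
    have harg : bitsArg s_115f46 = 6 := by
      rw [bitsArg_def, w_rsi_115f46]
      decide
    rw [hrdi, harg] at hpost
    have hbitsr : Bits (g.Blk A) g.len s_115f46r.mem g.f := hpost.bits.bits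
    have hres : GetBitsResult 6 (s_115f46r.reg .rax).toNat := hpost.bits.result
    rw [w_rax] at hres
    have hzlt : z.toNat < 64 := hres.2 (by omega)
    clear hpost w_post hres
    u_walk hcode [hμ.vendor] until [Vorbis.L.start_decoder.cut279, Vorbis.L.start_decoder.cut272] span [Vorbis.L.textLo, Vorbis.L.textHi] side (v_side)
    · -- 0x115f56: the check of `f->mode_count` (store4 f+0x1e0, C line 4142): inside `*f`
      have hun : ShadowUntouched s_115f46r.mem s_115f56.mem := by v_untouched
      have hobj : LiveIn A.2 g.frames' g.f Off.sizeof.stb_vorbis := hb.hand.obj.mono (frames'_sub g A.2)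
      refine hobj.accSmall hfr.shadow (hunr.trans hun) _ 4 (by decide) (by u_omega) ?_
      simp only [Vorbis.Off.sizeof.stb_vorbis]
      u_omega
    · -- 0x115f67 (cut272): SD.8, `mode_count` stored, `r14d = i = 0`: the exit to R13 (C lines 4142, 4143)
      refine ReachVia.done (Or.inr ⟨A, ?_⟩)
      -- the counter reached `mapping_count`: the branch was not taken
      have hi64 : (i : Int) ≤ 64 := by
        have h1 := hb.i_le
        have h2 := hb.maps.MP1.2
        omega
      have ecnt : stb_vorbis.mapping_count v.mem g.f = sint32 mc := by
        simp only [vacc, voff]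
        rw [Mem.i32_def, hmc]
      rw [Vorbis.Spec.start_decoder_R8.toInt_counter i (by omega), toInt_ofNat32 mc (by rw [← hmc]; exact Mem.u32_lt _ _)]
        at hbr_115f38
      have hieq : (i : Int) = stb_vorbis.mapping_count v.mem g.f := by
        have h1 := hb.i_le
        rw [ecnt] at h1 ⊢
        omega
      -- SD.8 at the entry memory
      have hmid0 : Mid g 8 8 9 A.1 A v.mem := Vorbis.Spec.start_decoder_R8.mid_commit hb.mid hb.maps hieq
      -- the whole footprint of the path: the two return addresses, `get_bits`' windows, the store of `mode_count`
      have hS1 : Mem.SameExcept [⟨(v.reg .rsp).toNat - 8, (v.reg .rsp).toNat⟩] v.mem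
          (v.mem.writeLE (v.reg .rsp - 8) 8 1138507) := by
        u_same
      have hS3 : Mem.SameExcept [⟨(v.reg .rsp).toNat - 8, (v.reg .rsp).toNat⟩,
          ⟨(v.reg .rbp).toNat + 480, (v.reg .rbp).toNat + 484⟩] s_115f46r.mem s_115f62.mem := by
        u_same
      have hS := Vorbis.Spec.start_decoder_R8.sameExcept_append
        (Vorbis.Spec.start_decoder_R8.sameExcept_append hS1 w_same) hS3
      have ehi : Mid.hi 8 = 480 := rfl
      have ez : restFrom 9 = 868 := rfl
      have hws : ∀ w, w ∈ ([⟨(v.reg .rsp).toNat - 8, (v.reg .rsp).toNat⟩] ++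
          [⟨(v.reg .rsp - 8).toNat - 352, (v.reg .rsp - 8).toNat⟩,
            ⟨(v.reg .rbp).toNat + 48, (v.reg .rbp).toNat + 56⟩, ⟨(v.reg .rbp).toNat + 84, (v.reg .rbp).toNat + 96⟩,
            ⟨(v.reg .rbp).toNat + 136, (v.reg .rbp).toNat + 144⟩,
            ⟨(v.reg .rbp).toNat + 1484, (v.reg .rbp).toNat + 1749⟩,
            ⟨(v.reg .rbp).toNat + 1752, (v.reg .rbp).toNat + 1784⟩]) ++
          [⟨(v.reg .rsp).toNat - 8, (v.reg .rsp).toNat⟩,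
            ⟨(v.reg .rbp).toNat + 480, (v.reg .rbp).toNat + 484⟩] →
          Vorbis.Spec.start_decoder_R8.OKSpan g 8 9 w := by
        intro w hw
        unfold Vorbis.Spec.start_decoder_R8.OKSpan
        rw [ehi, ez]
        simp only [List.mem_append, List.mem_cons, List.mem_nil_iff, or_false] at hw
        rcases hw with (rfl | rfl | rfl | rfl | rfl | rfl | rfl) | rfl | rfl
        all_goals
          simp only []
          omega
      -- `Bits f` at the exit: the callee's post, then two stores off the bytes it reads
      have hbits : Bits (g.Blk A) g.len s_115f62.mem g.f := by
        apply Vorbis.Spec.start_decoder_R8.bits_carry hbitsr hS3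
        intro w hw
        simp only [List.mem_cons, List.mem_nil_iff, or_false] at hw
        rcases hw with rfl | rfl
        all_goals
          simp only []
          omega
      have hmid : Mid g 8 8 9 A.1 A s_115f62.mem :=
        Vorbis.Spec.start_decoder_R8.mid_carry hmid0 hb.hand ⟨hf1, hf2, hf3⟩ ⟨hR1, hR2, hR3, hR4⟩ hS hws hbits
      have hinv : abiInv s_115f62 := by v_inv
      have hframe : Frame u₀ g pc_R13 A s_115f62 :=
        Vorbis.Spec.start_decoder_R8.frame_carry hfr hb.mid.env.ok ⟨hf1, hf2, hf3⟩ ⟨hR1, hR2, hR3, hR4⟩ w_rip w_rsp w_eq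
          hinv hS hws
      -- MD1: `mode_count = get_bits(f, 6) + 1 ∈ [1, 64]`
      have ea : v.reg .rbp + 480 = addr (g.f + 480) := by
        rw [hb.rbp, addr_add_lit]
      have hval : s_115f62.mem.u32 (g.f + 480) = z.toNat + 1 := by
        simp only [Mem.u32]
        rw [w_mem, ← ea, Mem.readLE_writeLE_same _ _ _ _ (by decide),
          Vorbis.Spec.start_decoder_R8.succ_small z hzlt]
        exact Nat.mod_eq_of_lt (by omega)
      have hmd1 : 1 ≤ stb_vorbis.mode_count s_115f62.mem g.f ∧ stb_vorbis.mode_count s_115f62.mem g.f ≤ 64 := by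
        simp only [vacc, voff]
        rw [Mem.i32_def, hval]
        unfold sint32
        split <;> omega
      refine ⟨hframe, hb.hand, hmid, ?_, ?_, ?_, ModeUpTo.zero hmd1⟩
      · rw [w_kept.get .rbp rfl]
        exact hb.rbp
      · rw [w_r14]
        rfl
      · omega
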